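-- pv_equiv track=rewrite | github.com/Kalyan970/TCP-iterative-client-server | TCP iterative client-server/stuffeddata.py | bit_unstuff
-- ===== SOURCE A (Python) =====
-- def bit_unstuff(stuffed_data):
--     unstuffed_data = ""
--     count = 0
--     consecutive_ones = 0
--
--     for bit in stuffed_data:
--         if bit == '1':
--             count += 1
--             consecutive_ones += 1
--             unstuffed_data += bit
--         else:
--             if count == 5 and consecutive_ones == 5:  # If 5 consecutive 1's are found, and the next bit is 0, remove the stuffed 0 bit
--                 count = 0
--                 consecutive_ones = 0
--                 continue
--             else:
--                 count = 0
--                 consecutive_ones = 0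
--                 unstuffed_data += bit
--
--     return unstuffed_data
-- ===== SOURCE B (Python) =====
-- def bit_unstuff(stuffed_data):
--     # Process runs of ones instead of counting bit-by-bit: after a run of
--     # exactly five '1's, the following (non-'1') character is the stuffed
--     # bit and is dropped; any other run keeps its following character.
--     out = []
--     n = len(stuffed_data)
--     i = 0
--     while i < n:
--         j = i
--         while j < n and stuffed_data[j] == '1':
--             j += 1
--         out.append(stuffed_data[i:j])        # the run of ones
--         if j == n:
--             break
--         if j - i != 5:
--             out.append(stuffed_data[j])      # keep the char after a non-5 run
--         i = j + 1
--     return ''.join(out)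
-- ===== Notes on version B (the rewrite author's own statement) =====
-- stated objective: alternative
-- what changed: B scans runs of consecutive '1's with two index pointers and drops the single character that follows a run of exactly five, instead of A's bit-by-bit loop with two redundant counters and per-character string appends.
import Mathlib
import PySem

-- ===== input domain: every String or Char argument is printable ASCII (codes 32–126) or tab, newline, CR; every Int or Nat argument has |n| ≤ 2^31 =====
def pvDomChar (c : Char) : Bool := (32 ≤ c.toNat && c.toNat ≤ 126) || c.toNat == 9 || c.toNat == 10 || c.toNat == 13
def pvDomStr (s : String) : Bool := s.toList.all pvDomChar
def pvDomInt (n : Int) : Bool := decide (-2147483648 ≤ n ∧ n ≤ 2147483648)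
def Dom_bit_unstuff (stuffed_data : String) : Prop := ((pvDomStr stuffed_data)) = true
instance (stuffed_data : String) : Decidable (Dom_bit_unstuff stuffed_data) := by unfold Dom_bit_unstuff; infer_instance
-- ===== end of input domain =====

-- B replaces A's bit-by-bit loop with its two counters by a run-of-ones scan that drops
-- the single character following a run of exactly five '1's (alternative decomposition).

-- ===== PORT A =====
-- one step of A's for-loop; state = (count, consecutive_ones, unstuffed_data as chars)
def pvAStep (st : Int × Int × List Char) (bit : Char) : Int × Int × List Char :=
  match st with
  | (count, consecutive_ones, acc) =>
    if bit = '1' then (count + 1, consecutive_ones + 1, acc ++ [bit])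
    else if count = 5 ∧ consecutive_ones = 5 then (0, 0, acc)
    else (0, 0, acc ++ [bit])

def bit_unstuff (stuffed_data : String) : String :=
  String.ofList ((stuffed_data.toList.foldl pvAStep (0, 0, [])).2.2)

-- ===== PORT B =====
-- B's outer while loop: keep the leading run of '1's; drop the following character
-- iff the run has length exactly 5; continue on the remaining suffix.
def pvBLoop : List Char → List Char
  | [] => []
  | c :: cs =>
    let run := (c :: cs).takeWhile (· = '1')
    let rest := (c :: cs).dropWhile (· = '1')
    match hr : rest with
    | [] => run
    | d :: rest' => run ++ (if run.length ≠ 5 then [d] else []) ++ pvBLoop rest'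
termination_by l => l.length
decreasing_by
  have h := List.length_dropWhile_le (fun x => decide (x = '1')) (c :: cs)
  simp only [rest] at hr
  rw [hr] at h
  simpa using Nat.lt_of_lt_of_le (by simp) h

def bit_unstuff_alt (stuffed_data : String) : String :=
  String.ofList (pvBLoop stuffed_data.toList)

-- ===== PRECONDITION & SPEC =====
def Spec_bit_unstuff (stuffed_data : String) (out : String) : Prop := out = bit_unstuff_alt stuffed_data
instance (stuffed_data : String) (out : String) : Decidable (Spec_bit_unstuff stuffed_data out) := by unfold Spec_bit_unstuff; infer_instance

-- ===== CLAIM (what is proved, stated in full; the proofs are below) =====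
def Claim_equal_bit_unstuff : Prop := ∀ (stuffed_data : String), Dom_bit_unstuff stuffed_data → Spec_bit_unstuff stuffed_data (bit_unstuff stuffed_data)

-- ===== LEMMAS AND PROOFS =====

-- common characterisation of the unstuffed output, k = consecutive ones already seen
def pvSpec : Int → List Char → List Char
  | _, [] => []
  | k, c :: cs =>
    if c = '1' then c :: pvSpec (k + 1) cs
    else if k = 5 then pvSpec 0 cs else c :: pvSpec 0 cs

-- A's fold from a state whose two counters both equal k produces acc ++ pvSpec k cs
theorem pvA_foldl (cs : List Char) : ∀ (k : Int) (acc : List Char),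
    (cs.foldl pvAStep (k, k, acc)).2.2 = acc ++ pvSpec k cs := by
  induction cs with
  | nil => intro k acc; simp [pvSpec]
  | cons c cs ih =>
    intro k acc
    by_cases h1 : c = '1'
    · simp [List.foldl_cons, pvAStep, pvSpec, h1, ih]
    · by_cases h5 : k = 5
      · simp [List.foldl_cons, pvAStep, pvSpec, h1, h5, ih]
      · simp [List.foldl_cons, pvAStep, pvSpec, h1, h5, ih]

-- pvSpec passes a run of '1's through, adding its length to the counter
theorem pvSpec_run (ones : List Char) : ∀ (rest : List Char) (k : Int),
    (∀ x ∈ ones, x = '1') →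
    pvSpec k (ones ++ rest) = ones ++ pvSpec (k + ones.length) rest := by
  induction ones with
  | nil => intro rest k _; simp
  | cons o os ih =>
    intro rest k h
    have ho : o = '1' := h o (by simp)
    have hos : ∀ x ∈ os, x = '1' := fun x hx => h x (by simp [hx])
    simp only [List.cons_append, pvSpec, ho, ih rest (k + 1) hos, List.length_cons]
    have hk : k + ((os.length : Int) + 1) = k + 1 + os.length := by ring
    rw [Nat.cast_add, Nat.cast_one, hk]
    simp

-- B's run loop computes pvSpec from counter 0
theorem pvB_eq_spec (cs : List Char) : pvBLoop cs = pvSpec 0 cs := by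
  induction cs using pvBLoop.induct with
  | case1 => simp [pvBLoop, pvSpec]
  | case2 a b c hc =>
    have hc' : List.dropWhile (fun x => decide (x = '1')) (a :: b) = [] := hc
    have hsplit := List.takeWhile_append_dropWhile (p := fun x => decide (x = '1')) (l := a :: b)
    rw [hc', List.append_nil] at hsplit
    have hones : ∀ x ∈ (a :: b).takeWhile (fun x => decide (x = '1')), x = '1' := by
      intro x hx; simpa using List.mem_takeWhile_imp hx
    rw [pvBLoop]
    split
    · conv_rhs => rw [← hsplit]
      have := pvSpec_run ((a :: b).takeWhile (fun x => decide (x = '1'))) [] 0 hones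
      simpa [pvSpec] using this.symm
    · next _ _ hmatch => rw [hc'] at hmatch; cases hmatch
  | case3 a b c d e hc ih =>
    have hc' : List.dropWhile (fun x => decide (x = '1')) (a :: b) = d :: e := hc
    have hsplit := List.takeWhile_append_dropWhile (p := fun x => decide (x = '1')) (l := a :: b)
    rw [hc'] at hsplit
    have hones : ∀ x ∈ (a :: b).takeWhile (fun x => decide (x = '1')), x = '1' := by
      intro x hx; simpa using List.mem_takeWhile_imp hx
    have hne : List.dropWhile (fun x => decide (x = '1')) (a :: b) ≠ [] := by simp [hc']
    have hd : ¬ d = '1' := by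
      have := List.head_dropWhile_not (fun x => decide (x = '1')) hne
      simpa [hc'] using this
    rw [pvBLoop]
    split
    · next hmatch => rw [hc'] at hmatch; cases hmatch
    next d' rest' hmatch =>
    rw [hc'] at hmatch
    injection hmatch with h1 h2
    subst h1; subst h2
    rw [ih]
    conv_rhs => rw [← hsplit]
    rw [pvSpec_run _ _ 0 hones]
    set n := ((a :: b).takeWhile (fun x => decide (x = '1'))).length with hn
    simp only [pvSpec, hd, zero_add]
    by_cases h5 : n = 5
    · simp [h5]
    · have : ¬ ((n : Int) = 5) := by exact_mod_cast h5
      simp [h5, this]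

-- ===== VERDICT (by name: the statement is the Claim_ definition above) =====
theorem bit_unstuff_spec : Claim_equal_bit_unstuff := by
  intro s _
  unfold Spec_bit_unstuff bit_unstuff bit_unstuff_alt
  rw [pvA_foldl, pvB_eq_spec]
  simp
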